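-- pv_equiv track=rewrite | github.com/blankqspace/na-vi-language-analyzer | navi_word.py | _apply_lenition
-- ===== SOURCE A (Python) =====
-- def _apply_lenition(word: str) -> str:
--
--     lenition_rules = {
--         "px": "p",
--         "tx": "t",
--         "kx": "k",
--         "p": "p",
--         "t": "t",
--         "k": "k",
--     }
--     for from_sound, to_sound in lenition_rules.items():
--         if word.startswith(from_sound):
--             return to_sound + word[len(from_sound) :]
--     return word
-- ===== SOURCE B (Python) =====
-- def _apply_lenition(word: str) -> str:
--     # The three single-character "rules" (p->p, t->t, k->k) are identities,
--     # so the function only ever drops an 'x' after a leading p/t/k.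
--     if len(word) >= 2 and word[0] in "ptk" and word[1] == "x":
--         return word[0] + word[2:]
--     return word
-- ===== Notes on version B (the rewrite author's own statement) =====
-- stated objective: simpler
-- what changed: Replaced the ordered rule-table loop with a single direct predicate: the three identity rules are dropped and B just strips a trailing 'x' from a leading p/t/k.
import Mathlib
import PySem

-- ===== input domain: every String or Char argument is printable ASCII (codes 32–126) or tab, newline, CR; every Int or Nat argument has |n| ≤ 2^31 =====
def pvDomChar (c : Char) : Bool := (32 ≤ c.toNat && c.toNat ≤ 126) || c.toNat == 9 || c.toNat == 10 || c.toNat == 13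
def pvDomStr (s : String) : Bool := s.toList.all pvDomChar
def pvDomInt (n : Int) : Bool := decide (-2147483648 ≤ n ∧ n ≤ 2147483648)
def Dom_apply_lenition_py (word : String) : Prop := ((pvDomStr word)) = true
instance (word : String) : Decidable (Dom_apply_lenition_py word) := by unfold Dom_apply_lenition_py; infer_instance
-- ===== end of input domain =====

-- B replaces A's ordered lenition-rule table loop with one direct check (identity rules dropped); objective: simpler.


-- ===== PORT A =====
-- the ordered lenition_rules dict, as an association list
def lenRules : List (List Char × List Char) :=
  [(['p','x'],['p']), (['t','x'],['t']), (['k','x'],['k']),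
   (['p'],['p']), (['t'],['t']), (['k'],['k'])]

-- the 'for from_sound, to_sound in lenition_rules.items()' loop with its early return
def lenLoop : List (List Char × List Char) → List Char → List Char
  | [], w => w
  | (f, t) :: rest, w =>
      if PySem.Chars.startswith w f then t ++ PySem.Chars.slice w (some (f.length : Int)) none
      else lenLoop rest w

def apply_lenition_py (word : String) : String :=
  String.ofList (lenLoop lenRules word.toList)

-- ===== PORT B =====
-- 'len(word) >= 2 and word[0] in "ptk" and word[1] == "x"' then 'word[0] + word[2:]'
def lenAltCore : List Char → List Char
  | c :: x :: rest =>
      if (PySem.Chars.isIn [c] ['p','t','k']) && (x == 'x') then c :: rest else c :: x :: rest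
  | cs => cs

def apply_lenition_py_alt (word : String) : String :=
  String.ofList (lenAltCore word.toList)

-- ===== PRECONDITION & SPEC =====
def Spec_apply_lenition_py (word : String) (out : String) : Prop := out = apply_lenition_py_alt word
instance (word : String) (out : String) : Decidable (Spec_apply_lenition_py word out) := by unfold Spec_apply_lenition_py; infer_instance

-- ===== CLAIM (what is proved, stated in full; the proofs are below) =====
def Claim_equal_apply_lenition_py : Prop := ∀ (word : String), Dom_apply_lenition_py word → Spec_apply_lenition_py word (apply_lenition_py word)

-- ===== LEMMAS AND PROOFS =====
theorem lenLoop_eq_altCore (cs : List Char) : lenLoop lenRules cs = lenAltCore cs := by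
  rcases cs with _ | ⟨c, _ | ⟨x, rest⟩⟩
  · simp [lenRules, lenLoop, lenAltCore, PySem.Chars.startswith]
  · by_cases hc : 'p' = c <;> by_cases ht : 't' = c <;> by_cases hk : 'k' = c <;>
      simp_all [lenRules, lenLoop, lenAltCore, PySem.Chars.startswith, PySem.List.slice,
        PySem.Chars.slice] <;> (try (split_ifs <;> simp_all)) <;> (try assumption)
  · by_cases hc : 'p' = c <;> by_cases ht : 't' = c <;> by_cases hk : 'k' = c <;>
      by_cases hx : 'x' = x <;>
      simp_all [lenRules, lenLoop, lenAltCore, PySem.Chars.startswith, PySem.List.slice,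
        PySem.Chars.slice, PySem.Chars.isIn, PySem.Chars.find, PySem.Chars.find.go] <;>
      (try intro) <;> (try split_ifs) <;> (try simp_all) <;> (try assumption) <;> simp_all [eq_comm]

-- ===== VERDICT (by name: the statement is the Claim_ definition above) =====
theorem apply_lenition_py_spec : Claim_equal_apply_lenition_py := by
  intro word _
  unfold Spec_apply_lenition_py apply_lenition_py apply_lenition_py_alt
  exact congrArg String.ofList (lenLoop_eq_altCore word.toList)
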